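-- pv_equiv track=rewrite | github.com/Roobotti/projekti | Solver/solver.py | get_piece_dimensions
-- ===== SOURCE A (Python) =====
-- def get_piece_dimensions(mytuple):
--     """
--     retrieves the dimensions (x,y,z) of the input piece
--     """
--     dim_x = 0
--     dim_y = 0
--     dim_z = 0
--     for i, j, k in mytuple:
--         dim_x = i if i > dim_x else dim_x
--         dim_y = j if j > dim_y else dim_y
--         dim_z = k if k > dim_z else dim_z
--
--     return dim_x + 1, dim_y + 1, dim_z + 1
-- ===== SOURCE B (Python) =====
-- def get_piece_dimensions(mytuple):
--     """
--     retrieves the dimensions (x,y,z) of the input piece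
--     """
--     cells = list(mytuple)
--     top_x = sorted([0] + [c[0] for c in cells])[-1]
--     top_y = sorted([0] + [c[1] for c in cells])[-1]
--     top_z = sorted([0] + [c[2] for c in cells])[-1]
--     return top_x + 1, top_y + 1, top_z + 1
-- ===== Notes on version B (the rewrite author's own statement) =====
-- stated objective: alternative
-- what changed: Replaces A's single row-wise loop carrying three running maxima by a sort-based strategy: each coordinate column is seeded with 0 (the origin), sorted, and its last element taken as the axis maximum.
import Mathlib
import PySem

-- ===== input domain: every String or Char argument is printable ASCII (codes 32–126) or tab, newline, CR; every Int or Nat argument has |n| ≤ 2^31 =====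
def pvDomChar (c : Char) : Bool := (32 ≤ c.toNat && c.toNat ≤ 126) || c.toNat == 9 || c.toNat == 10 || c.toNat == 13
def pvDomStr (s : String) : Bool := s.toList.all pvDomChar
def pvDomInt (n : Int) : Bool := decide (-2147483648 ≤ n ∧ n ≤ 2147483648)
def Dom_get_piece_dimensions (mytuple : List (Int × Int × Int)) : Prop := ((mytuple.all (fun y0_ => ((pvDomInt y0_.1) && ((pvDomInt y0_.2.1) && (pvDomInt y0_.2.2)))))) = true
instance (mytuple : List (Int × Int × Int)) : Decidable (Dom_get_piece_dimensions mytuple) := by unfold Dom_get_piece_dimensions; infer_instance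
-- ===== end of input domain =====

-- B replaces A's row-wise loop of three running maxima by sorting each 0-seeded
-- coordinate column and taking its last element; alternative decomposition, same values.

-- ===== PORT A =====
-- literal port of A: one fold over the rows, three running comparisons
def get_piece_dimensions (mytuple : List (Int × Int × Int)) : Int × Int × Int :=
  let s := mytuple.foldl
    (fun (acc : Int × Int × Int) t =>
      (if t.1 > acc.1 then t.1 else acc.1,
       if t.2.1 > acc.2.1 then t.2.1 else acc.2.1,
       if t.2.2 > acc.2.2 then t.2.2 else acc.2.2))
    (0, 0, 0)
  (s.1 + 1, s.2.1 + 1, s.2.2 + 1)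

-- ===== PORT B =====
-- Python's sorted([0] + col)[-1]; the list is nonempty (it contains the seed 0),
-- so pyGet? never returns none and the .getD 0 default is unreachable
def pyTop (col : List Int) : Int :=
  (PySem.List.pyGet? (PySem.List.sorted ((0 : Int) :: col) (fun x => x) false) (-1)).getD 0

def get_piece_dimensions_alt (mytuple : List (Int × Int × Int)) : Int × Int × Int :=
  let cells := mytuple
  let top_x := pyTop (cells.map (fun c => c.1))
  let top_y := pyTop (cells.map (fun c => c.2.1))
  let top_z := pyTop (cells.map (fun c => c.2.2))
  (top_x + 1, top_y + 1, top_z + 1)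

-- ===== PRECONDITION & SPEC =====
def Spec_get_piece_dimensions (mytuple : List (Int × Int × Int)) (out : Int × Int × Int) : Prop := out = get_piece_dimensions_alt mytuple
instance (mytuple : List (Int × Int × Int)) (out : Int × Int × Int) : Decidable (Spec_get_piece_dimensions mytuple out) := by unfold Spec_get_piece_dimensions; infer_instance

-- ===== CLAIM (what is proved, stated in full; the proofs are below) =====
def Claim_equal_get_piece_dimensions : Prop := ∀ (mytuple : List (Int × Int × Int)), Dom_get_piece_dimensions mytuple → Spec_get_piece_dimensions mytuple (get_piece_dimensions mytuple)

-- ===== LEMMAS AND PROOFS =====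

-- A's running comparison is just max
theorem pv_if_gt_eq_max (a t : Int) : (if t > a then t else a) = max a t := by
  rw [max_def]; split_ifs <;> omega

-- A's fold computes the three column-wise max-folds
theorem pv_foldA_eq (l : List (Int × Int × Int)) (a b c : Int) :
    l.foldl
      (fun (acc : Int × Int × Int) t =>
        (if t.1 > acc.1 then t.1 else acc.1,
         if t.2.1 > acc.2.1 then t.2.1 else acc.2.1,
         if t.2.2 > acc.2.2 then t.2.2 else acc.2.2)) (a, b, c)
    = ((l.map (fun p => p.1)).foldl max a,
       (l.map (fun p => p.2.1)).foldl max b,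
       (l.map (fun p => p.2.2)).foldl max c) := by
  induction l generalizing a b c with
  | nil => rfl
  | cons t ts ih =>
    simp only [List.foldl_cons, List.map_cons]
    rw [ih, pv_if_gt_eq_max, pv_if_gt_eq_max, pv_if_gt_eq_max]

-- foldl max is a member of the seeded list
theorem pv_foldl_max_mem (l : List Int) (a : Int) : l.foldl max a ∈ a :: l := by
  induction l generalizing a with
  | nil => simp
  | cons x xs ih =>
    simp only [List.foldl_cons]
    have h := ih (max a x)
    rcases List.mem_cons.1 h with h | h
    · rw [h]; rcases max_choice a x with hm | hm <;> rw [hm] <;> simp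
    · simp [h]
  
-- foldl max bounds every element of the seeded list
theorem pv_le_foldl_max (l : List Int) (a : Int) : ∀ y ∈ a :: l, y ≤ l.foldl max a := by
  induction l generalizing a with
  | nil => intro y hy; simp at hy; simp [hy]
  | cons x xs ih =>
    intro y hy
    simp only [List.foldl_cons]
    rcases List.mem_cons.1 hy with h | h
    · subst h; exact le_trans (le_max_left y x) (ih _ _ List.mem_cons_self)
    · rcases List.mem_cons.1 h with h | h
      · subst h; exact le_trans (le_max_right a y) (ih _ _ List.mem_cons_self)
      · exact ih _ _ (List.mem_cons.2 (Or.inr h))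

-- last element (with default) of a ≤-sorted list bounds every member
theorem pv_mem_le_lastD (s : List Int) (hp : s.Pairwise (· ≤ ·)) :
    ∀ y ∈ s, y ≤ s.getLast?.getD 0 := by
  induction s with
  | nil => intro y hy; simp at hy
  | cons a t ih =>
    intro y hy
    rcases List.pairwise_cons.1 hp with ⟨ha, ht⟩
    cases t with
    | nil => simp at hy; simp [hy]
    | cons b u =>
      rw [List.getLast?_cons_cons]
      rcases List.mem_cons.1 hy with h | h
      · exact h ▸ le_trans (ha b (by simp)) (ih ht b (by simp))
      · exact ih ht y h
  
-- last element (with default) of a nonempty list is a member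
theorem pv_lastD_mem (s : List Int) (hs : s ≠ []) : s.getLast?.getD 0 ∈ s := by
  rw [List.getLast?_eq_some_getLast hs]
  exact List.getLast_mem hs

-- pyGet? at -1 on a nonempty list is the last element
theorem pv_pyGet_neg_one (s : List Int) (hs : s ≠ []) :
    (PySem.List.pyGet? s (-1)).getD 0 = s.getLast?.getD 0 := by
  cases s with
  | nil => exact absurd rfl hs
  | cons a t =>
    simp [PySem.List.pyGet?, PySem.List.pyIdx?, List.getLast?_eq_getElem?]

-- the sort-based column top equals the running max
theorem pv_pyTop_eq (col : List Int) : pyTop col = col.foldl max 0 := by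
  unfold pyTop
  have hne : PySem.List.sorted ((0 : Int) :: col) (fun x => x) false ≠ [] := by
    simp [PySem.List.sorted_eq_nil_iff]
  rw [pv_pyGet_neg_one _ hne]
  set s := PySem.List.sorted ((0 : Int) :: col) (fun x => x) false with hs
  have hperm : s.Perm ((0 : Int) :: col) := PySem.List.sorted_perm _ _ _
  have hpw : s.Pairwise (· ≤ ·) := PySem.List.sorted_pairwise _ _
  have hlmem : s.getLast?.getD 0 ∈ (0 : Int) :: col :=
    hperm.mem_iff.1 (pv_lastD_mem s hne)
  have hfmem : col.foldl max 0 ∈ s :=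
    hperm.mem_iff.2 (pv_foldl_max_mem col 0)
  exact le_antisymm (pv_le_foldl_max col 0 _ hlmem) (pv_mem_le_lastD s hpw _ hfmem)

-- ===== VERDICT (by name: the statement is the Claim_ definition above) =====
theorem get_piece_dimensions_spec : Claim_equal_get_piece_dimensions := by
  intro mytuple _
  unfold Spec_get_piece_dimensions get_piece_dimensions get_piece_dimensions_alt
  simp only [pv_foldA_eq, pv_pyTop_eq]
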